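-- pv_equiv track=rewrite | github.com/z8Tygas/Laboratorios-de-Algoritmia-II | Torneio 1/formula1.py | formula1
-- ===== SOURCE A (Python) =====
-- def formula1(log):
--     fastest = {}
--     log.sort(key = lambda x: x[0])
--     for tempo, driver in log:
--         if driver not in fastest:
--             fastest[driver] = [tempo, tempo]
--         else:
--             if tempo - fastest[driver][1] < fastest[driver][0]:
--                 fastest[driver][0] = tempo - fastest[driver][1]
--         fastest[driver][1] = tempo
--
--     final = []
--     for driver, tempo in sorted(fastest.items(), key = lambda x: (x[1][0], x[0]) ):
--         if len(final) == 0: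
--             mintime = tempo[0]
--             final.append(driver)
--         elif tempo[0] == mintime:
--             final.append(driver)
--
--     return final
-- ===== SOURCE B (Python) =====
-- def formula1(log):
--     # same in-place sort of the argument as the original
--     log.sort(key=lambda x: x[0])
--     laps = {}
--     for tempo, driver in log:
--         laps.setdefault(driver, []).append(tempo)
--     gaps = {d: min([ts[0]] + [b - a for a, b in zip(ts, ts[1:])]) for d, ts in laps.items()}
--     if not gaps:
--         return []
--     best = min(gaps.values())
--     return sorted(d for d, g in gaps.items() if g == best)
-- ===== Notes on version B (the rewrite author's own statement) =====
-- stated objective: simpler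
-- what changed: A's single pass maintaining a [min-gap, last-tempo] pair per driver plus a manual first-element/mintime selection loop is replaced by a phase decomposition: sort, group tempos per driver into a dict, take each driver's min(first tempo, consecutive differences) in a comprehension, then filter on the global minimum and sort the names.
import Mathlib
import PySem

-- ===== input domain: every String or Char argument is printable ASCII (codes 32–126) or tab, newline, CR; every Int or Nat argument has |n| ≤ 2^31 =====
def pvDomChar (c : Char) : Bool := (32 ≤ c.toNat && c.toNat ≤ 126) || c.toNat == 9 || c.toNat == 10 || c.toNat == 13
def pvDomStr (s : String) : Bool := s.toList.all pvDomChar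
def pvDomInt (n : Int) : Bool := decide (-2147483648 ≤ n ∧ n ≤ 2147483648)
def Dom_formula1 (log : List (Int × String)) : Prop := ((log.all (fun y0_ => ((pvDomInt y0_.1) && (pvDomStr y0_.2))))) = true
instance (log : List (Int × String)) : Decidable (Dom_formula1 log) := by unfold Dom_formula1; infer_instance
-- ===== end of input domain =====

-- B replaces A's single-pass [min-gap, last-tempo] tracking and manual mintime selection loop by
-- a phase decomposition: sort, group tempos per driver, per-driver min of (first tempo :: gaps),
-- filter on the global minimum, sort names. Both A and B sort the argument list in place in Python;
-- the equivalence proved here is about the return value.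


-- ===== PORT A =====
-- for tempo, driver in log: if driver not in fastest: fastest[driver] = [tempo, tempo]
--   else: if tempo - fastest[driver][1] < fastest[driver][0]: fastest[driver][0] = tempo - fastest[driver][1]
--   fastest[driver][1] = tempo
def pvStepA (d : PySem.Dict String (Int × Int)) (p : Int × String) : PySem.Dict String (Int × Int) :=
  d.insert p.2 (match d.get? p.2 with
    | none => (p.1, p.1)
    | some (mn, last) => ((if p.1 - last < mn then p.1 - last else mn), p.1))

-- the selection loop over sorted(fastest.items(), …); state = (final, mintime)
def pvSel (st : List String × Option Int) (it : String × (Int × Int)) : List String × Option Int :=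
  if st.1.isEmpty then (st.1 ++ [it.1], some it.2.1)
  else if st.2 == some it.2.1 then (st.1 ++ [it.1], st.2)
  else st

def formula1 (log : List (Int × String)) : List String :=
  let s := PySem.List.sorted log (fun x => x.1) false
  let fastest := s.foldl pvStepA PySem.Dict.empty
  ((PySem.List.sorted2 fastest.items (fun x => x.2.1) (fun x => x.1) false).foldl pvSel ([], none)).1

-- ===== PORT B =====
-- min([ts[0]] + [b - a for a, b in zip(ts, ts[1:])]); B only calls it on nonempty ts, where
-- 'ts.take 1' is exactly [ts[0]] and the min? is never none (so the .getD 0 default is never used)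
def pvGap (ts : List Int) : Int :=
  (PySem.List.min? (ts.take 1 ++ (ts.zip (ts.drop 1)).map (fun p => p.2 - p.1)) (fun x => x)).getD 0

-- laps.setdefault(driver, []).append(tempo)
def pvStepB (d : PySem.Dict String (List Int)) (p : Int × String) : PySem.Dict String (List Int) :=
  d.modify p.2 [] (fun ts => ts ++ [p.1])

def formula1_alt (log : List (Int × String)) : List String :=
  let s := PySem.List.sorted log (fun x => x.1) false
  let laps := s.foldl pvStepB PySem.Dict.empty
  let gaps := laps.items.foldl (fun (g : PySem.Dict String Int) p => g.insert p.1 (pvGap p.2)) PySem.Dict.empty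
  if gaps.items.isEmpty then []
  else
    let best := (PySem.List.min? gaps.values (fun x => x)).getD 0
    PySem.List.sorted ((gaps.items.filter (fun p => p.2 == best)).map (fun p => p.1)) (fun x => x) false

-- ===== PRECONDITION & SPEC =====
def Spec_formula1 (log : List (Int × String)) (out : List String) : Prop := out = formula1_alt log
instance (log : List (Int × String)) (out : List String) : Decidable (Spec_formula1 log out) := by unfold Spec_formula1; infer_instance

-- ===== CLAIM (what is proved, stated in full; the proofs are below) =====
def Claim_equal_formula1 : Prop := ∀ (log : List (Int × String)), Dom_formula1 log → Spec_formula1 log (formula1 log)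

-- ===== LEMMAS AND PROOFS =====

-- A's per-driver state update, as a step on Option (min-gap, last-tempo)
def pvScan1 (o : Option (Int × Int)) (t : Int) : Option (Int × Int) :=
  match o with
  | none => some (t, t)
  | some (mn, last) => some ((if t - last < mn then t - last else mn), t)

-- last element of a nonempty list (dummy 0 start)
def pvLastD (ts : List Int) : Int := ts.foldl (fun _ x => x) 0

-- the tempos of driver k in s, in order
def pvT (s : List (Int × String)) (k : String) : List Int :=
  (s.filter (fun p => p.2 == k)).map (fun p => p.1)

lemma pv_get?_foldA (l : List (Int × String)) (d : PySem.Dict String (Int × Int)) (k : String) :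
    (l.foldl pvStepA d).get? k = (pvT l k).foldl pvScan1 (d.get? k) := by
  induction l generalizing d with
  | nil => simp [pvT]
  | cons p l ih =>
    rw [List.foldl_cons, ih]
    by_cases h : p.2 = k
    · subst h
      cases hd : d.get? p.2 with
      | none => simp [pvT, pvStepA, hd, pvScan1]
      | some v =>
        cases v with
        | mk mn last => simp [pvT, pvStepA, hd, pvScan1]
    · have h2 : ¬ (k = p.2) := fun e => h e.symm
      simp [pvT, pvStepA, PySem.Dict.get?_insert, h, h2]

lemma pv_keysA (s : List (Int × String)) :
    (s.foldl pvStepA PySem.Dict.empty).keys = PySem.Set.ofList (s.map (fun p => p.2)) := by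
  unfold pvStepA
  rw [PySem.Dict.keys_foldl_insert_key, PySem.Dict.keys_empty, PySem.Set.update_nil_left]

lemma pv_nodup_keysA (s : List (Int × String)) :
    (s.foldl pvStepA PySem.Dict.empty).keys.Nodup := by
  rw [pv_keysA]
  exact PySem.Set.nodup_ofList _

lemma pv_keysB (s : List (Int × String)) :
    (s.foldl pvStepB PySem.Dict.empty).keys = PySem.Set.ofList (s.map (fun p => p.2)) := by
  unfold pvStepB
  rw [PySem.Dict.keys_foldl_modify_key, PySem.Dict.keys_empty, PySem.Set.update_nil_left]

lemma pv_nodup_keysB (s : List (Int × String)) :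
    (s.foldl pvStepB PySem.Dict.empty).keys.Nodup := by
  rw [pv_keysB]
  exact PySem.Set.nodup_ofList _

lemma pv_getD_foldB (s : List (Int × String)) (k : String) :
    (s.foldl pvStepB PySem.Dict.empty).getD k [] = pvT s k := by
  unfold pvStepB
  rw [show (s.foldl (fun (d : PySem.Dict String (List Int)) p => d.modify p.2 [] fun ts => ts ++ [p.1]) PySem.Dict.empty)
        = ((s.map Prod.swap).foldl (fun (d : PySem.Dict String (List Int)) q => d.modify q.1 [] fun ts => ts ++ [q.2]) PySem.Dict.empty)
      from by rw [List.foldl_map]; rfl]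
  rw [PySem.Dict.getD_foldl_modify_append]
  simp [pvT, PySem.Dict.getD_empty, List.filter_map, List.map_map, Function.comp_def]

-- diffs of a nonempty list extended by one element
lemma pv_diffs_append (t : Int) (ts : List Int) (x : Int) :
    (((t :: ts) ++ [x]).zip (((t :: ts) ++ [x]).drop 1)).map (fun p => p.2 - p.1)
      = ((t :: ts).zip ((t :: ts).drop 1)).map (fun p => p.2 - p.1) ++ [x - pvLastD (t :: ts)] := by
  induction ts generalizing t with
  | nil => simp [pvLastD]
  | cons a ts ih =>
    have h : pvLastD (t :: a :: ts) = pvLastD (a :: ts) := rfl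
    simp only [List.cons_append, List.drop_succ_cons, List.drop_zero, List.zip_cons_cons,
      List.map_cons, h] at *
    rw [ih a]

lemma pv_scan_spec (ts : List Int) (t : Int) :
    (t :: ts).foldl pvScan1 none = some (pvGap (t :: ts), pvLastD (t :: ts)) := by
  induction ts using List.reverseRecOn with
  | nil => simp [pvScan1, pvGap, pvLastD, PySem.List.min?_id_cons]
  | append_singleton ts x ih =>
    rw [show t :: (ts ++ [x]) = (t :: ts) ++ [x] from rfl, List.foldl_append, ih]
    have hlast : pvLastD ((t :: ts) ++ [x]) = x := by simp [pvLastD, List.foldl_append]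
    have hgap : pvGap ((t :: ts) ++ [x])
        = min (pvGap (t :: ts)) (x - pvLastD (t :: ts)) := by
      unfold pvGap
      rw [pv_diffs_append]
      simp only [List.cons_append, List.take_succ_cons, List.take_zero,
        PySem.List.min?_id_cons, Option.getD_some, List.foldl_append, List.foldl_cons, List.foldl_nil]
    rw [hlast, hgap]
    simp only [List.foldl_cons, List.foldl_nil, pvScan1]
    rw [min_def]
    split_ifs <;> simp <;> omega

-- the selection loop once final is nonempty
lemma pv_sel_loop (l : List (String × (Int × Int))) (acc : List String) (m : Int) (h : acc ≠ []) :
    (l.foldl pvSel (acc, some m)).1 = acc ++ (l.filter (fun p => p.2.1 == m)).map (fun p => p.1) := by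
  induction l generalizing acc with
  | nil => simp
  | cons it l ih =>
    rw [List.foldl_cons]
    have hne : acc.isEmpty = false := by simpa [List.isEmpty_iff] using h
    by_cases hm : it.2.1 = m
    · rw [show pvSel (acc, some m) it = (acc ++ [it.1], some m) from by simp [pvSel, hne, hm]]
      rw [ih (acc ++ [it.1]) (by simp)]
      simp [hm]
    · rw [show pvSel (acc, some m) it = (acc, some m) from by simp [pvSel, hne, Ne.symm hm]]
      rw [ih acc h]
      simp [hm]

-- sorted2 with keys (x.2.1, x.1) is sorted with the lexicographic key
lemma pv_sorted2_lex (xs : List (String × (Int × Int))) :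
    PySem.List.sorted2 xs (fun x => x.2.1) (fun x => x.1) false
      = PySem.List.sorted xs (fun x => (toLex (x.2.1, x.1) : Int ×ₗ String)) false := by
  unfold PySem.List.sorted2 PySem.List.sorted
  simp only [Bool.false_eq_true, if_false]
  have hb : (fun (a b : String × (Int × Int)) =>
        decide (a.2.1 < b.2.1) || (!decide (b.2.1 < a.2.1) && decide (a.1 < b.1)))
      = (fun (a b : String × (Int × Int)) =>
        decide ((toLex (a.2.1, a.1) : Int ×ₗ String) < toLex (b.2.1, b.1))) := by
    funext a b
    rcases lt_trichotomy a.2.1 b.2.1 with h | h | h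
    · simp [h, Prod.Lex.lt_iff, asymm h]
    · simp [h, Prod.Lex.lt_iff]
    · simp [Prod.Lex.lt_iff, asymm h, ne_of_gt h, h]
  rw [hb]

-- the two dicts, itemised over the same key list
lemma pv_itemsA (s : List (Int × String)) :
    (s.foldl pvStepA PySem.Dict.empty).items
      = (PySem.Set.ofList (s.map (fun p => p.2))).map
          (fun k => (k, (pvGap (pvT s k), pvLastD (pvT s k)))) := by
  rw [PySem.Dict.items_eq_map_keys _ (pv_nodup_keysA s) ((0 : Int), (0 : Int)), pv_keysA]
  apply List.map_congr_left
  intro k hk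
  have hmem : k ∈ s.map (fun p => p.2) := (PySem.Set.mem_ofList _ _).mp hk
  obtain ⟨p, hp, hpk⟩ := List.mem_map.mp hmem
  have hTmem : p.1 ∈ pvT s k := by
    simp only [pvT, List.mem_map, List.mem_filter]
    exact ⟨p, ⟨hp, by simp [hpk]⟩, rfl⟩
  cases hT : pvT s k with
  | nil => rw [hT] at hTmem; exact absurd hTmem (List.not_mem_nil)
  | cons t ts =>
    have hg := pv_get?_foldA s PySem.Dict.empty k
    rw [PySem.Dict.get?_empty, hT, pv_scan_spec] at hg
    rw [PySem.Dict.getD_eq_get?_getD, hg]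
    simp

lemma pv_itemsB (s : List (Int × String)) :
    (s.foldl pvStepB PySem.Dict.empty).items
      = (PySem.Set.ofList (s.map (fun p => p.2))).map (fun k => (k, pvT s k)) := by
  rw [PySem.Dict.items_eq_map_keys _ (pv_nodup_keysB s) ([] : List Int), pv_keysB]
  apply List.map_congr_left
  intro k _
  rw [pv_getD_foldB]


-- the gaps comprehension over distinct keys, as items
lemma pv_gaps_items (L : List String) (hL : L.Nodup) (f : String → List Int) :
    ((L.map (fun k => (k, f k))).foldl
        (fun (g : PySem.Dict String Int) p => g.insert p.1 (pvGap p.2)) PySem.Dict.empty).items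
      = L.map (fun k => (k, pvGap (f k))) := by
  rw [PySem.Dict.items_foldl_insert_fresh _ _ _ _ (by intro a _; simp)
      (by simpa [List.map_map, Function.comp_def] using hL)]
  simp [List.map_map, Function.comp_def, PySem.Dict.empty]

-- first component of a lexicographic comparison
lemma pv_lex_fst {a b : Int × String} (h : (toLex a : Int ×ₗ String) ≤ toLex b) : a.1 ≤ b.1 := by
  rcases Prod.Lex.le_iff.mp h with h1 | ⟨h1, _⟩
  · exact le_of_lt h1
  · exact le_of_eq h1

lemma pv_main (log : List (Int × String)) : formula1 log = formula1_alt log := by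
  simp only [formula1, formula1_alt]
  generalize PySem.List.sorted log (fun x => x.1) false = s
  rw [pv_itemsA, pv_itemsB, pv_sorted2_lex]
  simp only [PySem.Dict.values]
  have hnK : (PySem.Set.ofList (s.map (fun p => p.2))).Nodup := PySem.Set.nodup_ofList _
  rw [pv_gaps_items _ hnK]
  cases hK : PySem.Set.ofList (s.map (fun p => p.2)) with
  | nil => rfl
  | cons k0 K' =>
    rw [hK] at hnK
    set F : String → String × (Int × Int) := fun k => (k, (pvGap (pvT s k), pvLastD (pvT s k))) with hF
    set G : String → String × Int := fun k => (k, pvGap (pvT s k)) with hG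
    set K : List String := k0 :: K' with hKdef
    set klex : String × (Int × Int) → Int ×ₗ String := fun x => toLex (x.2.1, x.1) with hklex
    -- the sorted item list is nonempty
    have hPne : PySem.List.sorted (K.map F) klex false ≠ [] := by
      rw [Ne, PySem.List.sorted_eq_nil_iff]
      simp [hKdef]
    obtain ⟨q, rest, hP⟩ := List.exists_cons_of_ne_nil hPne
    have hperm : (q :: rest).Perm (K.map F) := hP ▸ PySem.List.sorted_perm (K.map F) klex false
    have hpw : (q :: rest).Pairwise (fun a b => klex a ≤ klex b) :=
      hP ▸ PySem.List.sorted_pairwise (K.map F) klex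
    have hall : ∀ y ∈ K.map F, klex q ≤ klex y := by
      intro y hyK
      rcases List.mem_cons.mp (hperm.symm.mem_iff.mp hyK) with hyq | hyr
      · rw [hyq]
      · exact List.rel_of_pairwise_cons hpw hyr
    -- A's selection loop
    rw [hP, List.foldl_cons,
      show pvSel ([], none) q = ([q.1], some q.2.1) from by simp [pvSel],
      pv_sel_loop rest [q.1] q.2.1 (by simp)]
    -- B's guard
    rw [show (K.map G).isEmpty = false from by simp [hKdef]]
    simp only [Bool.false_eq_true, if_false]
    -- B's minimum equals the gap of the head of A's sorted list
    obtain ⟨m, hm⟩ : ∃ m, PySem.List.min? ((K.map G).map (fun x => x.2)) (fun x => x) = some m := by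
      cases hmin : PySem.List.min? ((K.map G).map (fun x => x.2)) (fun x => x) with
      | none => rw [PySem.List.min?_eq_none_iff] at hmin; simp [hKdef] at hmin
      | some m => exact ⟨m, rfl⟩
    have hqmem : q ∈ K.map F := hperm.mem_iff.mp List.mem_cons_self
    have hqval : q.2.1 ∈ (K.map G).map (fun x => x.2) := by
      obtain ⟨kq, hkq, hFq⟩ := List.mem_map.mp hqmem
      refine List.mem_map.mpr ⟨G kq, List.mem_map.mpr ⟨kq, hkq, rfl⟩, ?_⟩
      rw [← hFq]
    have hmle : m ≤ q.2.1 := PySem.List.min?_isMin hm _ hqval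
    have hlem : q.2.1 ≤ m := by
      obtain ⟨v, hv, hvm⟩ := List.mem_map.mp (PySem.List.min?_mem hm)
      obtain ⟨km, hkm, hGm⟩ := List.mem_map.mp hv
      have hfst : q.2.1 ≤ (F km).2.1 := pv_lex_fst (hall (F km) (List.mem_map.mpr ⟨km, hkm, rfl⟩))
      have h2 : (F km).2.1 = m := by rw [hF]; simp only; rw [← hvm, ← hGm, hG]
      omega
    have hqm : q.2.1 = m := le_antisymm hlem hmle
    rw [hm, Option.getD_some]
    -- align the two filtered lists
    have hGF : K.map G = (K.map F).map (fun p => (p.1, p.2.1)) := by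
      simp [List.map_map, Function.comp_def, hF, hG]
    have hxs : ((K.map G).filter (fun p => p.2 == m)).map (fun p => p.1)
        = ((K.map F).filter (fun p => p.2.1 == m)).map (fun p => p.1) := by
      rw [hGF, List.filter_map]
      simp [List.map_map, Function.comp_def]
    rw [hxs]
    -- the left-hand side as a filter of the sorted list
    have hys : ([q.1] ++ (rest.filter (fun p => p.2.1 == q.2.1)).map (fun p => p.1))
        = ((q :: rest).filter (fun p => p.2.1 == m)).map (fun p => p.1) := by
      rw [← hqm]
      simp
    rw [hys]
    -- permutation of the two name lists
    have hpermf : (((q :: rest).filter (fun p => p.2.1 == m)).map (fun p => p.1)).Perm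
        (((K.map F).filter (fun p => p.2.1 == m)).map (fun p => p.1)) :=
      (hperm.filter _).map _
    -- the names are distinct, so equal gaps are strictly name-ordered
    have hKnames : (K.map F).map (fun p => p.1) = K := by
      simp [List.map_map, Function.comp_def, hF]
    have hnodup : ((q :: rest).map (fun p => p.1)).Nodup := by
      refine ((hperm.map (fun p => p.1)).nodup_iff).mpr ?_
      rw [hKnames]; exact hnK
    have hfstne : (q :: rest).Pairwise (fun a b => a.1 ≠ b.1) := List.pairwise_map.mp hnodup
    have hpwlt : (((q :: rest).filter (fun p => p.2.1 == m)).map (fun p => p.1)).Pairwise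
        (fun a b => a < b) := by
      refine List.pairwise_map.mpr ?_
      refine List.Pairwise.imp_of_mem ?_ ((hpw.and hfstne).filter (fun p => p.2.1 == m))
      intro a b ha hb hab
      have ha2 : a.2.1 = m := by simpa using List.of_mem_filter ha
      have hb2 : b.2.1 = m := by simpa using List.of_mem_filter hb
      rcases Prod.Lex.le_iff.mp hab.1 with h1 | ⟨_, h2⟩
      · simp only [hklex, ofLex_toLex] at h1; omega
      · exact lt_of_le_of_ne (by simpa [hklex, ofLex_toLex] using h2) hab.2
    exact (PySem.List.sorted_eq_of_perm_of_pairwise_lt _ _ _ hpermf hpwlt).symm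

-- ===== VERDICT (by name: the statement is the Claim_ definition above) =====
theorem formula1_spec : Claim_equal_formula1 := by
  intro log _
  exact pv_main log
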